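-- pv_equiv track=rewrite | github.com/MatheusW166/templaterx | main.py | collect_connected_vars
-- ===== SOURCE A (Python) =====
-- def collect_connected_vars(start_var: str, cooccurrence_map: dict[str, set[str]]):
--     stack = [start_var]
--     visited: set[str] = set()
--     result: set[str] = set()
--
--     while stack:
--         var = stack.pop()
--
--         if var in visited:
--             continue
--
--         visited.add(var)
--         result.add(var)
--
--         for neighbor in cooccurrence_map.get(var, ()):
--             if neighbor not in visited:
--                 stack.append(neighbor)
--             result.add(neighbor)
--
--     return result
-- ===== SOURCE B (Python) =====
-- def collect_connected_vars(start_var: str, cooccurrence_map: dict[str, set[str]]):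
--     visited: set[str] = set()
--     result: set[str] = set()
--
--     def visit(var):
--         if var in visited:
--             return
--         visited.add(var)
--         result.add(var)
--         neighbors = cooccurrence_map.get(var, ())
--         result.update(neighbors)
--         for neighbor in neighbors:
--             visit(neighbor)
--
--     visit(start_var)
--     return result
-- ===== Notes on version B (the rewrite author's own statement) =====
-- stated objective: simpler
-- what changed: The explicit work-stack loop with pop/push and a pop-time visited check is replaced by a recursive DFS helper that checks visited on entry and adds each node's whole neighbor set to the result in one update before recursing; the returned set is identical since reachability does not depend on traversal order.
import Mathlib
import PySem

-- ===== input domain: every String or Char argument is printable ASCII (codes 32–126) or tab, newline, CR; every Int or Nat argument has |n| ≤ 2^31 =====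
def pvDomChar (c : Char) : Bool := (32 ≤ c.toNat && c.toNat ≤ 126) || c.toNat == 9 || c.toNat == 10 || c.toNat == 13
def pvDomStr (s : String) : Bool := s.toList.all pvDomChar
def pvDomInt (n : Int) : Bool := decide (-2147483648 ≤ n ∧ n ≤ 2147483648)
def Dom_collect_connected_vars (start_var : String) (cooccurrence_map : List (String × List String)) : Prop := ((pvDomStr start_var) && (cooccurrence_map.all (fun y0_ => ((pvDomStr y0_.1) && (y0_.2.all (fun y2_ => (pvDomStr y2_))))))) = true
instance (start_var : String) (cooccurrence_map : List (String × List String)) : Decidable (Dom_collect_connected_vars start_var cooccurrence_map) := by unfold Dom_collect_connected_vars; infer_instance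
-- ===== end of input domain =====

-- B replaces A's explicit work-stack loop by a recursive DFS helper (same reachable set,
-- same cost). Both Pythons return a SET and iterate the dict's SET values, whose Python
-- iteration order is unspecified hash order and cannot affect the returned set; each port
-- fixes one concrete iteration order over the value list (A: list order, B: reversed list
-- order) and the theorem shows the two result-set representations coincide exactly.

-- cooccurrence_map.get(var, ()) — first-match dict lookup, default empty
def pvLookup (m : List (String × List String)) (var : String) : List String :=
  (PySem.Dict.mk m).getD var []

-- all strings the traversal can ever see: start_var and every dict value element
-- (used only to size the fuel guard that makes the loops total)
def pvUniv (start_var : String) (m : List (String × List String)) : List String :=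
  (start_var :: m.flatMap (fun kv => kv.2)).dedup

-- ===== PORT A =====
-- the while-stack loop; the stack is kept top-first (Python pops/appends at the end);
-- fuel is a totality guard only (proved sufficient below)
def pvRunA (m : List (String × List String)) :
    Nat → List String → PySem.Set String → PySem.Set String →
    PySem.Set String × PySem.Set String
  | 0, _, visited, result => (visited, result)
  | _ + 1, [], visited, result => (visited, result)
  | fuel + 1, var :: rest, visited, result =>
    if PySem.Set.contains visited var then
      pvRunA m fuel rest visited result
    else
      let visited' := PySem.Set.add visited var
      let result' := PySem.Set.add result var
      -- for neighbor in cooccurrence_map.get(var, ()): push if unvisited; result.add(neighbor)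
      let st := (pvLookup m var).foldl
        (fun (p : List String × PySem.Set String) n =>
          (if PySem.Set.contains visited' n then p.1 else n :: p.1,
           PySem.Set.add p.2 n))
        (rest, result')
      pvRunA m fuel st.1 visited' st.2

def collect_connected_vars (start_var : String) (cooccurrence_map : List (String × List String)) : List String :=
  (pvRunA cooccurrence_map
    (1 + (pvUniv start_var cooccurrence_map).length *
      (1 + (cooccurrence_map.flatMap (fun kv => kv.2)).length))
    [start_var] PySem.Set.empty PySem.Set.empty).2

-- ===== PORT B =====
-- the recursive visit(var) helper of Source B, closing over (visited, result).
-- Source B iterates the neighbor SET in Python's unspecified hash order (the returned set does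
-- not depend on it); the port fixes reversed-list order as that model order.
-- Fuel is a totality guard only (proved sufficient below).
def pvVisitB (m : List (String × List String)) :
    Nat → String → PySem.Set String × PySem.Set String →
    PySem.Set String × PySem.Set String
  | 0, _, s => s
  | fuel + 1, var, s =>
    if PySem.Set.contains s.1 var then s
    else
      let visited' := PySem.Set.add s.1 var
      let result' := PySem.Set.add s.2 var
      let nbrs := pvLookup m var
      let result'' := PySem.Set.update result' nbrs
      nbrs.reverse.foldl (fun t n => pvVisitB m fuel n t) (visited', result'')

def collect_connected_vars_alt (start_var : String) (cooccurrence_map : List (String × List String)) : List String :=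
  (pvVisitB cooccurrence_map (1 + (pvUniv start_var cooccurrence_map).length)
    start_var (PySem.Set.empty, PySem.Set.empty)).2

-- ===== PRECONDITION & SPEC =====
def Spec_collect_connected_vars (start_var : String) (cooccurrence_map : List (String × List String)) (out : List String) : Prop := out = collect_connected_vars_alt start_var cooccurrence_map
instance (start_var : String) (cooccurrence_map : List (String × List String)) (out : List String) : Decidable (Spec_collect_connected_vars start_var cooccurrence_map out) := by unfold Spec_collect_connected_vars; infer_instance

-- ===== CLAIM (what is proved, stated in full; the proofs are below) =====
def Claim_equal_collect_connected_vars : Prop := ∀ (start_var : String) (cooccurrence_map : List (String × List String)), Dom_collect_connected_vars start_var cooccurrence_map → Spec_collect_connected_vars start_var cooccurrence_map (collect_connected_vars start_var cooccurrence_map)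

-- ===== LEMMAS AND PROOFS =====

-- how many universe elements are still unvisited (the termination measure core)
def pvCount (start_var : String) (m : List (String × List String)) (vis : PySem.Set String) : Nat :=
  ((pvUniv start_var m).filter (fun x => !PySem.Set.contains vis x)).length


theorem pvLookup_cons (k : String) (vl : List String) (rest : List (String × List String)) (x : String) :
    pvLookup ((k,vl) :: rest) x = if k == x then vl else pvLookup rest x := by
  unfold pvLookup
  rw [PySem.Dict.getD_eq_get?_getD, PySem.Dict.get?_mk_cons]
  split <;> simp [PySem.Dict.getD_eq_get?_getD]

theorem pvNotContains (S : PySem.Set String) (x : String) :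
    (!PySem.Set.contains S x) = true ↔ x ∉ S := by
  rcases hb : PySem.Set.contains S x with _ | _
  · simp only [Bool.not_false]
    exact iff_of_true trivial (fun hmem => by
      have := (PySem.Set.contains_iff S x).mpr hmem
      rw [hb] at this; cases this)
  · simp only [Bool.not_true]
    exact iff_of_false (by simp) (fun h => h ((PySem.Set.contains_iff S x).mp hb))

theorem pvLookup_len_le (m : List (String × List String)) (var : String) :
    (pvLookup m var).length ≤ (m.flatMap (fun kv => kv.2)).length := by
  induction m with
  | nil => simp [pvLookup]; rfl
  | cons kv rest ih =>
    obtain ⟨k, vl⟩ := kv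
    rw [pvLookup_cons]
    simp only [List.flatMap_cons, List.length_append]
    split <;> omega

theorem pvLookup_mem_univ (s : String) (m : List (String × List String)) (var x : String)
    (hx : x ∈ pvLookup m var) : x ∈ pvUniv s m := by
  simp only [pvUniv, List.mem_dedup, List.mem_cons, List.mem_flatMap]
  right
  induction m with
  | nil =>
    have h0 : pvLookup [] var = [] := rfl
    rw [h0] at hx; cases hx
  | cons kv rest ih =>
    obtain ⟨k, vl⟩ := kv
    rw [pvLookup_cons] at hx
    by_cases h : (k == var) = true
    · simp [h] at hx; exact ⟨(k, vl), by simp, hx⟩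
    · simp [h] at hx
      obtain ⟨p, hp, hxp⟩ := ih hx
      exact ⟨p, by simp [hp], hxp⟩

theorem pvStart_mem_univ (s : String) (m : List (String × List String)) : s ∈ pvUniv s m := by
  simp [pvUniv]

theorem pvCount_mono (s : String) (m : List (String × List String))
    (vis vis' : PySem.Set String) (h : ∀ x, x ∈ vis → x ∈ vis') :
    pvCount s m vis' ≤ pvCount s m vis := by
  apply List.Sublist.length_le
  apply List.monotone_filter_right
  intro a ha
  rw [pvNotContains] at *
  exact fun hc => ha (h a hc)

theorem pvCount_add_lt (s : String) (m : List (String × List String))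
    (vis : PySem.Set String) (var : String) (hU : var ∈ pvUniv s m) (hv : var ∉ vis) :
    pvCount s m (PySem.Set.add vis var) + 1 ≤ pvCount s m vis := by
  have hsub : ((pvUniv s m).filter (fun x => !PySem.Set.contains (PySem.Set.add vis var) x)).Sublist
      ((pvUniv s m).filter (fun x => !PySem.Set.contains vis x)) := by
    apply List.monotone_filter_right
    intro a ha
    rw [pvNotContains] at *
    rw [PySem.Set.mem_add] at ha
    tauto
  have hlt : ((pvUniv s m).filter (fun x => !PySem.Set.contains (PySem.Set.add vis var) x)).length <
      ((pvUniv s m).filter (fun x => !PySem.Set.contains vis x)).length := by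
    rcases Nat.lt_or_ge _ _ with h | h
    · exact h
    · exfalso
      have heq := hsub.eq_of_length (Nat.le_antisymm (hsub.length_le) h)
      have hmem : var ∈ (pvUniv s m).filter (fun x => !PySem.Set.contains vis x) := by
        rw [List.mem_filter, pvNotContains]
        exact ⟨hU, hv⟩
      rw [← heq, List.mem_filter, pvNotContains, PySem.Set.mem_add] at hmem
      exact hmem.2 (Or.inr rfl)
  simpa [pvCount] using hlt

-- visited only grows under visitB
theorem pvVisitB_mono (m : List (String × List String)) :
    ∀ (f : Nat) (var : String) (st : PySem.Set String × PySem.Set String) (x : String),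
      x ∈ st.1 → x ∈ (pvVisitB m f var st).1 := by
  intro f
  induction f with
  | zero => intro var st x hx; simpa [pvVisitB] using hx
  | succ f ih =>
    intro var st x hx
    rw [pvVisitB]
    rcases hc : PySem.Set.contains st.1 var with _ | _
    · simp only [if_false, Bool.false_eq_true]
      have aux : ∀ (l : List String) (t : PySem.Set String × PySem.Set String),
          x ∈ t.1 → x ∈ (l.foldl (fun t n => pvVisitB m f n t) t).1 := by
        intro l
        induction l with
        | nil => intro t ht; simpa using ht
        | cons a l ihl => intro t ht; exact ihl _ (ih a t x ht)
      exact aux _ _ (by rw [PySem.Set.mem_add]; exact Or.inl hx)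
    · simpa [hc] using hx

-- a visited node is a no-op, at every fuel
theorem pvVisitB_skip (m : List (String × List String)) (f : Nat) (var : String)
    (st : PySem.Set String × PySem.Set String) (h : var ∈ st.1) : pvVisitB m f var st = st := by
  cases f with
  | zero => rfl
  | succ f =>
    rw [pvVisitB]
    rw [if_pos ((PySem.Set.contains_iff st.1 var).mpr h)]

-- fuel irrelevance: any two sufficient fuels agree
theorem pvVisitB_fuel (s : String) (m : List (String × List String)) :
    ∀ (k f g : Nat) (var : String) (st : PySem.Set String × PySem.Set String),
      var ∈ pvUniv s m → pvCount s m st.1 ≤ k → pvCount s m st.1 < f → pvCount s m st.1 < g →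
      pvVisitB m f var st = pvVisitB m g var st := by
  intro k
  induction k with
  | zero =>
    intro f g var st hU hk hf hg
    by_cases hv : var ∈ st.1
    · rw [pvVisitB_skip m f var st hv, pvVisitB_skip m g var st hv]
    · exact absurd (pvCount_add_lt s m st.1 var hU hv) (by omega)
  | succ k ih =>
    intro f g var st hU hk hf hg
    by_cases hv : var ∈ st.1
    · rw [pvVisitB_skip m f var st hv, pvVisitB_skip m g var st hv]
    · have hcnt := pvCount_add_lt s m st.1 var hU hv
      obtain ⟨f', rfl⟩ : ∃ f', f = f' + 1 := ⟨f - 1, by omega⟩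
      obtain ⟨g', rfl⟩ : ∃ g', g = g' + 1 := ⟨g - 1, by omega⟩
      rw [pvVisitB, pvVisitB]
      rw [if_neg (by simpa using hv), if_neg (by simpa using hv)]
      have hnb : ∀ n ∈ (pvLookup m var).reverse, n ∈ pvUniv s m := by
        intro n hn
        exact pvLookup_mem_univ s m var n (List.mem_reverse.mp hn)
      have aux : ∀ (l : List String), (∀ n ∈ l, n ∈ pvUniv s m) →
          ∀ (t : PySem.Set String × PySem.Set String),
          (∀ x, x ∈ PySem.Set.add st.1 var → x ∈ t.1) →
          l.foldl (fun t n => pvVisitB m f' n t) t = l.foldl (fun t n => pvVisitB m g' n t) t := by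
        intro l
        induction l with
        | nil => intro _ t _; rfl
        | cons a l ihl =>
          intro hl t ht
          have hct : pvCount s m t.1 ≤ pvCount s m (PySem.Set.add st.1 var) :=
            pvCount_mono s m _ _ ht
          have hstep : pvVisitB m f' a t = pvVisitB m g' a t :=
            ih f' g' a t (hl a (by simp)) (by omega) (by omega) (by omega)
          simp only [List.foldl_cons, hstep]
          exact ihl (fun n hn => hl n (by simp [hn])) _
            (fun x hx => pvVisitB_mono m g' a t x (ht x hx))
      exact aux _ hnb _ (fun x hx => hx)

theorem pvVisitB_fold_fuel (s : String) (m : List (String × List String)) (f g : Nat)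
    (l : List String) (st : PySem.Set String × PySem.Set String)
    (hl : ∀ x ∈ l, x ∈ pvUniv s m)
    (hf : pvCount s m st.1 < f) (hg : pvCount s m st.1 < g) :
    l.foldl (fun t n => pvVisitB m f n t) st = l.foldl (fun t n => pvVisitB m g n t) st := by
  induction l generalizing st with
  | nil => rfl
  | cons a l ihl =>
    have hstep : pvVisitB m f a st = pvVisitB m g a st :=
      pvVisitB_fuel s m (pvCount s m st.1) f g a st (hl a (by simp)) le_rfl hf hg
    have hmono : pvCount s m (pvVisitB m g a st).1 ≤ pvCount s m st.1 :=
      pvCount_mono s m _ _ (fun x hx => pvVisitB_mono m g a st x hx)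
    simp only [List.foldl_cons, hstep]
    exact ihl _ (fun x hx => hl x (by simp [hx])) (by omega) (by omega)

-- the pair foldl of A's neighbor loop splits into stack and result parts
theorem pvPairFold (vis' : PySem.Set String) (nbrs : List String) :
    ∀ (rst : List String) (r : PySem.Set String),
      nbrs.foldl
        (fun (p : List String × PySem.Set String) n =>
          (if PySem.Set.contains vis' n then p.1 else n :: p.1, PySem.Set.add p.2 n))
        (rst, r)
      = ((nbrs.filter (fun n => !PySem.Set.contains vis' n)).reverse ++ rst,
         PySem.Set.update r nbrs) := by
  induction nbrs with
  | nil => intro rst r; simp [PySem.Set.update]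
  | cons a nbrs ih =>
    intro rst r
    simp only [List.foldl_cons, List.filter_cons]
    rcases hc : PySem.Set.contains vis' a with _ | _
    · simp only [Bool.false_eq_true, if_false, Bool.not_false, if_true]
      rw [ih]
      simp [PySem.Set.update]
    · simp only [if_true, Bool.not_true, Bool.false_eq_true, if_false]
      rw [ih]
      simp [PySem.Set.update]

-- statically dropping already-visited entries does not change the fold
theorem pvFold_filter (m : List (String × List String)) (f : Nat)
    (vis0 : PySem.Set String) :
    ∀ (l : List String) (st : PySem.Set String × PySem.Set String),
      (∀ x, x ∈ vis0 → x ∈ st.1) →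
      (l.filter (fun n => !PySem.Set.contains vis0 n)).foldl (fun t n => pvVisitB m f n t) st
        = l.foldl (fun t n => pvVisitB m f n t) st := by
  intro l
  induction l with
  | nil => intro st _; rfl
  | cons a l ihl =>
    intro st hst
    simp only [List.filter_cons]
    rcases hc : PySem.Set.contains vis0 a with _ | _
    · simp only [Bool.not_false, if_true, List.foldl_cons]
      exact ihl _ (fun x hx => pvVisitB_mono m f a st x (hst x hx))
    · simp only [Bool.not_true, Bool.false_eq_true, if_false, List.foldl_cons]
      have ha : a ∈ st.1 := hst a ((PySem.Set.contains_iff vis0 a).mp hc)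
      rw [pvVisitB_skip m f a st ha]
      exact ihl _ hst

-- MAIN: A's stack machine equals folding B's visit over the stack
theorem pvMain (s : String) (m : List (String × List String)) (fB : Nat) :
    ∀ (fA : Nat) (stack : List String) (vis res : PySem.Set String),
      (∀ x ∈ stack, x ∈ pvUniv s m) →
      stack.length + pvCount s m vis * (1 + (m.flatMap (fun kv => kv.2)).length) ≤ fA →
      pvCount s m vis < fB →
      pvRunA m fA stack vis res
        = stack.foldl (fun t n => pvVisitB m fB n t) (vis, res) := by
  intro fA
  induction fA with
  | zero =>
    intro stack vis res hsub hphi hfB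
    have : stack = [] := by
      cases stack with
      | nil => rfl
      | cons a l => simp at hphi
    subst this
    rfl
  | succ f ih =>
    intro stack vis res hsub hphi hfB
    cases stack with
    | nil => rfl
    | cons var rst =>
      have hvarU : var ∈ pvUniv s m := hsub var (by simp)
      rw [pvRunA]
      rcases hc : PySem.Set.contains vis var with _ | _
      · have hv : var ∉ vis := fun hmem => by
          have := (PySem.Set.contains_iff vis var).mpr hmem
          rw [hc] at this; cases this
        rw [if_neg (by simp [hv])]
        simp only [pvPairFold]
        set W := (m.flatMap (fun kv => kv.2)).length with hW
        have hcnt := pvCount_add_lt s m vis var hvarU hv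
        have hlen := pvLookup_len_le m var
        have hfillen : ((pvLookup m var).filter
            (fun n => !PySem.Set.contains (PySem.Set.add vis var) n)).length ≤ W := by
          calc _ ≤ (pvLookup m var).length := (List.filter_sublist).length_le
            _ ≤ W := hlen
        have hmul : pvCount s m (PySem.Set.add vis var) * (1 + W) + (1 + W)
            ≤ pvCount s m vis * (1 + W) := by
          have h1 : pvCount s m (PySem.Set.add vis var) + 1 ≤ pvCount s m vis := hcnt
          calc pvCount s m (PySem.Set.add vis var) * (1 + W) + (1 + W)
              = (pvCount s m (PySem.Set.add vis var) + 1) * (1 + W) := by ring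
            _ ≤ pvCount s m vis * (1 + W) := Nat.mul_le_mul_right _ h1
        obtain ⟨g, hg⟩ : ∃ g, fB = g + 1 := ⟨fB - 1, by omega⟩
        rw [ih]
        · rw [List.foldl_cons, List.foldl_append]
          rw [hg, pvVisitB, ← hg]
          rw [if_neg (by simpa using hv)]
          simp only []
          have hnbU : ∀ x ∈ (pvLookup m var).reverse, x ∈ pvUniv s m := fun x hx =>
            pvLookup_mem_univ s m var x (List.mem_reverse.mp hx)
          rw [pvVisitB_fold_fuel s m g fB _ _ hnbU (by show pvCount s m (PySem.Set.add vis var) < g; omega) (by show pvCount s m (PySem.Set.add vis var) < fB; omega)]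
          congr 1
          rw [← List.filter_reverse]
          exact pvFold_filter m fB (PySem.Set.add vis var) (pvLookup m var).reverse
            (PySem.Set.add vis var, PySem.Set.update (PySem.Set.add res var) (pvLookup m var))
            (fun x hx => hx)
        · intro x hx
          rcases List.mem_append.mp hx with h | h
          · exact pvLookup_mem_univ s m var x
              (List.mem_of_mem_filter (List.mem_reverse.mp h))
          · exact hsub x (by simp [h])
        · simp only [List.length_append, List.length_reverse, List.length_cons] at hphi ⊢
          omega
        · omega
      · have hvmem : var ∈ vis := (PySem.Set.contains_iff vis var).mp hc
        rw [if_pos (by simp [hc])]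
        rw [List.foldl_cons, pvVisitB_skip m fB var (vis, res) hvmem]
        exact ih rst vis res (fun x hx => hsub x (by simp [hx])) (by simp at hphi ⊢; omega) hfB

-- ===== VERDICT (by name: the statement is the Claim_ definition above) =====
theorem collect_connected_vars_spec : Claim_equal_collect_connected_vars := by
  intro s m _
  unfold Spec_collect_connected_vars collect_connected_vars collect_connected_vars_alt
  have hcE : pvCount s m PySem.Set.empty ≤ (pvUniv s m).length :=
    (List.filter_sublist).length_le
  have hmul : pvCount s m PySem.Set.empty * (1 + (m.flatMap (fun kv => kv.2)).length)
      ≤ (pvUniv s m).length * (1 + (m.flatMap (fun kv => kv.2)).length) :=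
    Nat.mul_le_mul_right _ hcE
  rw [pvMain s m (1 + (pvUniv s m).length) _ [s] PySem.Set.empty PySem.Set.empty
    (fun x hx => by simpa using (List.mem_singleton.mp hx) ▸ pvStart_mem_univ s m)
    (by simp only [List.length_singleton]; omega)
    (by omega)]
  simp only [List.foldl_cons, List.foldl_nil]
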